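-- pv_equiv track=rewrite | github.com/chloekoee/fit3155 | a2/q1test.py | to_int_keys_best
-- ===== SOURCE A (Python) =====
-- def to_int_keys_best(list):
--     """
--     l: iterable of keys
--     returns: a list with integer keys
--     """
--     seen = set()
--     ls = []
--     for e in list:
--         if e not in seen:
--             ls.append(e)
--             seen.add(e)
--     ls.sort()
--     index = {v: i for i, v in enumerate(ls)}
--     return [index[v] for v in list]
-- ===== SOURCE B (Python) =====
-- def to_int_keys_best(list):
--     """
--     l: iterable of keys
--     returns: a list with integer keys
--     """
--     return [len({x for x in list if x < v}) for v in list]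
-- ===== Notes on version B (the rewrite author's own statement) =====
-- stated objective: simpler
-- what changed: Replaces the dedup-set, in-place sort and value-to-rank dict with a one-line comprehension that computes each element's rank directly as the number of distinct values smaller than it.
import Mathlib
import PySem

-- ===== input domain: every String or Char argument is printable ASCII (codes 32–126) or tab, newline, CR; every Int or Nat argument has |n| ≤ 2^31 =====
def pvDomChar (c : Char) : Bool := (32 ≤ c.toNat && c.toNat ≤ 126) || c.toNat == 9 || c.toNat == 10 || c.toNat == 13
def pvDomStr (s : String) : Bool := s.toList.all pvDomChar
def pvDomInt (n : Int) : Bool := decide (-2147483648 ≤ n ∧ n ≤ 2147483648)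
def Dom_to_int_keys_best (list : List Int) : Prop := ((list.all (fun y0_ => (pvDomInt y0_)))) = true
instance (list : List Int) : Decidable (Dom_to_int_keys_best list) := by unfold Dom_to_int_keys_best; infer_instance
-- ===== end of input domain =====

-- B replaces A's dedup-set + sort + rank dict with a one-line comprehension giving each
-- element's rank as the number of distinct smaller values (simpler, not faster).

-- ===== PORT A =====
-- A: build first-occurrence dedup ls (with set 'seen'), sort it, map values to positions, look each element up.
def to_int_keys_best (list : List Int) : List Int :=
  let p := list.foldl
    (fun (p : PySem.Set Int × List Int) e =>
      if PySem.Set.contains p.1 e then p else (PySem.Set.add p.1 e, p.2 ++ [e]))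
    (PySem.Set.empty, [])
  let ls := PySem.List.sorted p.2 (fun x => x) false
  let index := (PySem.List.enumerate ls).foldl
    (fun (d : PySem.Dict Int Int) iv => d.insert iv.2 iv.1) PySem.Dict.empty
  -- index[v]: v is always a key (v ∈ list ⇒ v ∈ ls), so Python's dict lookup never raises;
  -- the .getD 0 default is unreachable.
  list.map (fun v => (index.get? v).getD 0)

-- ===== PORT B =====
def to_int_keys_best_alt (list : List Int) : List Int :=
  list.map (fun v => ((PySem.Set.ofList (list.filter (fun x => decide (x < v)))).length : Int))

-- ===== PRECONDITION & SPEC =====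
def Spec_to_int_keys_best (list : List Int) (out : List Int) : Prop := out = to_int_keys_best_alt list
instance (list : List Int) (out : List Int) : Decidable (Spec_to_int_keys_best list out) := by unfold Spec_to_int_keys_best; infer_instance

-- ===== CLAIM (what is proved, stated in full; the proofs are below) =====
def Claim_equal_to_int_keys_best : Prop := ∀ (list : List Int), Dom_to_int_keys_best list → Spec_to_int_keys_best list (to_int_keys_best list)

-- ===== LEMMAS AND PROOFS =====

-- A's dedup loop: the pair stays (s, s) and both components run Set.add.
theorem pv_fold_pair (l : List Int) (s : List Int) :
    l.foldl (fun (p : PySem.Set Int × List Int) e =>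
      if PySem.Set.contains p.1 e then p else (PySem.Set.add p.1 e, p.2 ++ [e])) (s, s)
    = (l.foldl PySem.Set.add s, l.foldl PySem.Set.add s) := by
  induction l generalizing s with
  | nil => rfl
  | cons e t ih =>
    simp only [List.foldl_cons]
    by_cases h : e ∈ s
    · rw [if_pos (by simpa [PySem.Set.contains_iff] using h)]
      rw [PySem.Set.add_of_mem h]
      exact ih s
    · rw [if_neg (by simpa [PySem.Set.contains_iff] using h)]
      rw [PySem.Set.add_of_not_mem h]
      exact ih (s ++ [e])

-- two Nodup lists with the same members have the same length
theorem pv_len_eq_of_nodup_ext {xs ys : List Int} (hx : xs.Nodup) (hy : ys.Nodup)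
    (h : ∀ a, a ∈ xs ↔ a ∈ ys) : xs.length = ys.length :=
  ((List.perm_ext_iff_of_nodup hx hy).mpr h).length_eq

-- in a strictly increasing list, the position of v is the number of elements < v
theorem pv_countP_lt_of_sorted (ys : List Int) (hs : ys.Pairwise (· < ·)) (i : Nat) (v : Int)
    (hv : ys[i]? = some v) : ys.countP (fun x => decide (x < v)) = i := by
  induction ys generalizing i with
  | nil => simp at hv
  | cons y t ih =>
    rcases List.pairwise_cons.mp hs with ⟨hy, ht⟩
    cases i with
    | zero =>
      simp at hv
      subst hv
      simp only [List.countP_cons]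
      have h1 : ¬ (y < y) := lt_irrefl y
      have h2 : t.countP (fun x => decide (x < y)) = 0 := by
        rw [List.countP_eq_zero]
        intro a ha
        simpa using not_lt.mpr (le_of_lt (hy a ha))
      simp [h2]
    | succ n =>
      simp only [List.getElem?_cons_succ] at hv
      have hyt : y < v := by
        have hmem : v ∈ t := List.mem_of_getElem? hv
        exact hy v hmem
      have := ih ht n hv
      simp [this, hyt]

-- the rank dict built over 'enumerate ls': items are the swapped enumerate pairs
theorem pv_index_items (ys : List Int) (hnd : ys.Nodup) :
    ((PySem.List.enumerate ys).foldl
      (fun (d : PySem.Dict Int Int) iv => d.insert iv.2 iv.1) PySem.Dict.empty).items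
    = (PySem.List.enumerate ys).map (fun iv => (iv.2, iv.1)) := by
  have h := PySem.Dict.items_foldl_insert_fresh (l := PySem.List.enumerate ys)
    (k := fun iv => iv.2) (v := fun iv => iv.1) (d := PySem.Dict.empty)
    (by intro a _; simp [PySem.Dict.contains_empty])
    (by simpa [PySem.List.map_snd_enumerate] using hnd)
  simpa using h

theorem to_int_keys_best_point (list : List Int) (v : Int) (hv : v ∈ list) :
    let ls := PySem.List.sorted (PySem.Set.ofList list) (fun x => x) false
    let index := (PySem.List.enumerate ls).foldl
      (fun (d : PySem.Dict Int Int) iv => d.insert iv.2 iv.1) PySem.Dict.empty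
    ((index.get? v).getD 0)
      = ((PySem.Set.ofList (list.filter (fun x => decide (x < v)))).length : Int) := by
  intro ls index
  have hperm : ls.Perm (PySem.Set.ofList list) := PySem.List.sorted_perm _ _ _
  have hpair : ls.Pairwise (· < ·) := PySem.List.sorted_ofList_pairwise_lt list
  have hnd : ls.Nodup := hpair.nodup
  have hvls : v ∈ ls := hperm.mem_iff.mpr ((PySem.Set.mem_ofList list v).mpr hv)
  obtain ⟨i, hi, hget⟩ := List.getElem_of_mem hvls
  have hitems : index.items = (PySem.List.enumerate ls).map (fun iv => (iv.2, iv.1)) :=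
    pv_index_items ls hnd
  have hkeysnd : index.keys.Nodup := by
    have := PySem.Dict.nodup_keys_foldl_insert_key (l := PySem.List.enumerate ls)
      (key := fun iv => iv.2) (f := fun _ iv => iv.1) (d := PySem.Dict.empty)
      (by simp)
    exact this
  have hmemitems : (v, (i : Int)) ∈ index.items := by
    rw [hitems]
    refine List.mem_map.mpr ⟨((i : Int), v), ?_, rfl⟩
    rw [PySem.List.mem_enumerate_iff]
    exact ⟨i, hi, by simp [hget]⟩
  have hgetv : index.get? v = some (i : Int) :=
    PySem.Dict.get?_of_mem_items index hmemitems hkeysnd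
  rw [hgetv]
  simp only [Option.getD_some]
  -- now: (i : Int) = length of distinct smaller values
  have hlen : (PySem.Set.ofList (list.filter (fun x => decide (x < v)))).length
      = (ls.filter (fun x => decide (x < v))).length := by
    apply pv_len_eq_of_nodup_ext (PySem.Set.nodup_ofList _) (hnd.filter _)
    intro a
    simp only [PySem.Set.mem_ofList, List.mem_filter, hperm.mem_iff,
      PySem.Set.mem_ofList]
  have hcount : (ls.filter (fun x => decide (x < v))).length = i := by
    rw [← List.countP_eq_length_filter]
    exact pv_countP_lt_of_sorted ls hpair i v (by simp [hi, hget])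
  rw [hlen, hcount]

-- ===== VERDICT (by name: the statement is the Claim_ definition above) =====
theorem to_int_keys_best_spec : Claim_equal_to_int_keys_best := by
  intro list _
  unfold Spec_to_int_keys_best to_int_keys_best to_int_keys_best_alt
  have hfold := pv_fold_pair list []
  simp only [PySem.Set.empty] at *
  rw [hfold]
  have hofl : list.foldl PySem.Set.add [] = PySem.Set.ofList list :=
    (PySem.Set.ofList_eq_foldl list).symm
  rw [hofl]
  apply List.map_congr_left
  intro v hv
  exact to_int_keys_best_point list v hv
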